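-- pv_equiv track=rewrite | github.com/xjlr/ProjectEuler | problem53.py | first_greater_than
-- ===== SOURCE A (Python) =====
-- import math
--
-- def first_greater_than(n, threshold=1_000_000):
--     left = 1
--     right = n // 2
--
--     while left < right:
--         mid = (left + right) // 2
--         if math.comb(n, mid) > threshold:
--             right = mid
--         else:
--             left = mid + 1
--
--     if math.comb(n, left) > threshold:
--         return left
--     else:
--         return -1
-- ===== SOURCE B (Python) =====
-- import math
--
-- def first_greater_than(n, threshold=1_000_000):
--     # scan always checks at least k=1, matching A's final unconditional comb(n, left) test
--     for k in range(1, max(n // 2, 1) + 1):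
--         if math.comb(n, k) > threshold:
--             return k
--     return -1
-- ===== Notes on version B (the rewrite author's own statement) =====
-- stated objective: faster
-- what changed: Replaces the binary search over [1, n//2] with a linear scan returning the first k (scanning at least k=1, as A's final unconditional comb(n,1) check does) with comb(n,k) > threshold; by monotonicity of comb(n,.) on [1,n//2] this is the same value, and the scan stops at the small first hit instead of evaluating gigantic mid-range binomials near n/4.
import Mathlib
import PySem

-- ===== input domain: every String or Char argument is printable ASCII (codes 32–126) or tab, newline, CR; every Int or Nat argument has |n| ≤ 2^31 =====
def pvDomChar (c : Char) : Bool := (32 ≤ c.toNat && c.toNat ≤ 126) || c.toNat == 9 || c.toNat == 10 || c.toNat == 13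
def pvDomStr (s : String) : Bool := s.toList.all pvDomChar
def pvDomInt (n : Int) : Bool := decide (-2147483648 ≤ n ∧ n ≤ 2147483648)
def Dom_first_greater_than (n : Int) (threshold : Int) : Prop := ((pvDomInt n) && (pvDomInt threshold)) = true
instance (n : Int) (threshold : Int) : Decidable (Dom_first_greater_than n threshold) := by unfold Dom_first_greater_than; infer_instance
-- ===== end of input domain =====

-- B replaces A's binary search with a linear scan for the first k in [1, max(n//2,1)]
-- with comb(n,k) > threshold (faster in practice: it avoids the huge mid-range binomials).
-- Pre_ excludes n < 0, where Python's math.comb raises ValueError in both programs.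


-- ===== PORT A =====
-- math.comb(n, k); exact for 0 ≤ n, 0 ≤ k (Pre_ gives 0 ≤ n; every k both ports pass is ≥ 1)
def combZ (n k : Int) : Int := (Nat.choose n.toNat k.toNat : Int)

-- the 'while left < right' loop of A
def aLoop (n threshold left right : Int) : Int :=
  if h : left < right then
    let mid := PySem.Int.floordiv (left + right) 2
    if combZ n mid > threshold then aLoop n threshold left mid
    else aLoop n threshold (mid + 1) right
  else left
termination_by (right - left).toNat
decreasing_by
  · have h1 : PySem.Int.floordiv (left + right) 2 < right :=
      (PySem.Int.floordiv_lt_iff_lt_mul (by norm_num)).mpr (by omega)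
    omega
  · have h2 : left ≤ PySem.Int.floordiv (left + right) 2 :=
      (PySem.Int.le_floordiv_iff_mul_le (by norm_num)).mpr (by omega)
    omega

def first_greater_than (n : Int) (threshold : Int) : Int :=
  let left : Int := 1
  let right : Int := PySem.Int.floordiv n 2
  let l := aLoop n threshold left right
  if combZ n l > threshold then l else -1

-- ===== PORT B =====
-- linear scan: first k in range(1, max(n//2, 1) + 1) with comb(n,k) > threshold, else -1
def first_greater_than_alt (n : Int) (threshold : Int) : Int :=
  ((PySem.List.pyRange 1 (max (PySem.Int.floordiv n 2) 1 + 1) 1).find?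
      (fun k => decide (combZ n k > threshold))).getD (-1)

-- ===== PRECONDITION & SPEC =====
-- Pre_ excludes n < 0, where Python's math.comb raises ValueError.
def Pre_first_greater_than (n : Int) (threshold : Int) : Prop := 0 ≤ n
instance (n : Int) (threshold : Int) : Decidable (Pre_first_greater_than n threshold) := by
  unfold Pre_first_greater_than; infer_instance

def pvWitness_first_greater_than : Int × Int := (10, 100)

def Spec_first_greater_than (n : Int) (threshold : Int) (out : Int) : Prop :=
  out = first_greater_than_alt n threshold
instance (n : Int) (threshold : Int) (out : Int) : Decidable (Spec_first_greater_than n threshold out) := by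
  unfold Spec_first_greater_than; infer_instance

-- ===== CLAIM (what is proved, stated in full; the proofs are below) =====
def Claim_equal_first_greater_than : Prop := ∀ (n : Int) (threshold : Int), Dom_first_greater_than n threshold → Pre_first_greater_than n threshold → Spec_first_greater_than n threshold (first_greater_than n threshold)

-- ===== LEMMAS AND PROOFS =====

-- comb(n, ·) is monotone on [1, n//2]
lemma choose_mono_half (N : Nat) : ∀ b a : Nat, a ≤ b → b ≤ N / 2 → N.choose a ≤ N.choose b := by
  intro b
  induction b with
  | zero => intro a ha _; interval_cases a; exact le_refl _
  | succ b ih =>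
    intro a ha hb
    rcases Nat.lt_or_ge a (b + 1) with h | h
    · exact (ih a (by omega) (by omega)).trans
        (Nat.choose_le_succ_of_lt_half_left (by omega))
    · have : a = b + 1 := by omega
      subst this; exact le_refl _

lemma combZ_mono (n : Int) (hn : 0 ≤ n) (j k : Int) (hj : 1 ≤ j) (hjk : j ≤ k)
    (hk : k ≤ PySem.Int.floordiv n 2) : combZ n j ≤ combZ n k := by
  have h2 : PySem.Int.floordiv n 2 = n / 2 := PySem.Int.floordiv_eq_ediv_of_pos (by norm_num)
  rw [h2] at hk
  have hhalf : k.toNat ≤ n.toNat / 2 := by omega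
  have hjk' : j.toNat ≤ k.toNat := by omega
  unfold combZ
  exact_mod_cast choose_mono_half n.toNat k.toNat j.toNat hjk' hhalf

lemma aLoop_spec (n t R : Int) (hn : 0 ≤ n) (hR : R = PySem.Int.floordiv n 2) :
    ∀ m : Nat, ∀ l r : Int, (r - l).toNat = m → 1 ≤ l → l ≤ r → r ≤ R →
    (∀ k, 1 ≤ k → k < l → ¬ (t < combZ n k)) → (r < R → t < combZ n r) →
    (1 ≤ aLoop n t l r ∧ aLoop n t l r ≤ r ∧
      (∀ k, 1 ≤ k → k < aLoop n t l r → ¬ (t < combZ n k)) ∧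
      (aLoop n t l r < R → t < combZ n (aLoop n t l r))) := by
  intro m
  induction m using Nat.strong_induction_on with
  | _ m ih =>
    intro l r hm hl hlr hrR hbelow hright
    rw [aLoop]
    by_cases hlt : l < r
    · simp only [hlt, dite_true]
      have hmid1 : l ≤ PySem.Int.floordiv (l + r) 2 :=
        (PySem.Int.le_floordiv_iff_mul_le (by norm_num)).mpr (by omega)
      have hmid2 : PySem.Int.floordiv (l + r) 2 < r :=
        (PySem.Int.floordiv_lt_iff_lt_mul (by norm_num)).mpr (by omega)
      set mid := PySem.Int.floordiv (l + r) 2 with hmiddef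
      by_cases hp : combZ n mid > t
      · simp only [hp, if_true]
        have := ih (r - l - (r - mid)).toNat (by omega) l mid (by omega) hl hmid1
          (by omega) hbelow (fun _ => hp)
        exact ⟨this.1, this.2.1.trans (le_of_lt hmid2), this.2.2.1, this.2.2.2⟩
      · simp only [hp, if_false]
        have hbelow' : ∀ k, 1 ≤ k → k < mid + 1 → ¬ (t < combZ n k) := by
          intro k hk1 hk2
          by_cases hkl : k < l
          · exact hbelow k hk1 hkl
          · intro hPk
            have hmono : combZ n k ≤ combZ n mid :=
              combZ_mono n hn k mid hk1 (by omega) (by omega)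
            exact hp (lt_of_lt_of_le hPk hmono)
        exact ih (r - (mid + 1)).toNat (by omega) (mid + 1) r (by omega) (by omega)
          (by omega) hrR hbelow' hright
    · simp only [hlt, dite_false]
      have : l = r := by omega
      subst this
      exact ⟨hl, le_refl _, hbelow, hright⟩

-- find? over a Python range: the first hit
lemma find?_pyRange_some (p : Int → Bool) : ∀ m : Nat, ∀ a b l : Int, (b - a).toNat = m →
    a ≤ l → l < b → (∀ k, a ≤ k → k < l → p k = false) → p l = true →
    (PySem.List.pyRange a b 1).find? p = some l := by
  intro m
  induction m with
  | zero => intro a b l hm hal hlb _ _; omega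
  | succ m ih =>
    intro a b l hm hal hlb hbelow hl
    rw [PySem.List.pyRange_one_cons (by omega)]
    by_cases hae : a = l
    · subst hae; simp [List.find?, hl]
    · have hpa : p a = false := hbelow a le_rfl (by omega)
      simp only [List.find?, hpa]
      exact ih (a + 1) b l (by omega) (by omega) hlb
        (fun k hk1 hk2 => hbelow k (by omega) hk2) hl

lemma find?_pyRange_none (p : Int → Bool) : ∀ m : Nat, ∀ a b : Int, (b - a).toNat = m →
    (∀ k, a ≤ k → k < b → p k = false) →
    (PySem.List.pyRange a b 1).find? p = none := by
  intro m
  induction m with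
  | zero => intro a b hm _; rw [PySem.List.pyRange_one_eq_nil (by omega)]; rfl
  | succ m ih =>
    intro a b hm h
    rw [PySem.List.pyRange_one_cons (by omega)]
    have hpa : p a = false := h a le_rfl (by omega)
    simp only [List.find?, hpa]
    exact ih (a + 1) b (by omega) (fun k hk1 hk2 => h k (by omega) hk2)

-- ===== VERDICT (by name: the statement is the Claim_ definition above) =====

theorem first_greater_than_spec : Claim_equal_first_greater_than := by
  intro n t _ hpre
  unfold Pre_first_greater_than at hpre
  unfold Spec_first_greater_than first_greater_than first_greater_than_alt
  have hfd : PySem.Int.floordiv n 2 = n / 2 := PySem.Int.floordiv_eq_ediv_of_pos (by norm_num)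
  set R := PySem.Int.floordiv n 2 with hRdef
  have hR0 : 0 ≤ R := by omega
  set p : Int → Bool := fun k => decide (combZ n k > t) with hpdef
  by_cases hR1 : 1 ≤ R
  · have hmax : max R 1 = R := by omega
    rw [hmax]
    obtain ⟨hL1, hLR, hLbelow, hLright⟩ :=
      aLoop_spec n t R hpre hRdef (R - 1).toNat 1 R rfl (by omega) hR1 le_rfl
        (by intro k hk1 hk2; omega) (fun h => absurd h (lt_irrefl R))
    set L := aLoop n t 1 R with hLdef
    by_cases hPL : combZ n L > t
    · have hfind : (PySem.List.pyRange 1 (R + 1) 1).find? p = some L := by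
        apply find?_pyRange_some p R.toNat 1 (R + 1) L (by omega) (by omega) (by omega)
        · intro k hk1 hk2
          simp only [hpdef, decide_eq_false_iff_not]
          exact hLbelow k hk1 hk2
        · simp only [hpdef, decide_eq_true_eq]; exact hPL
      rw [hfind]
      simp only [Option.getD_some]
      show (if combZ n L > t then L else -1) = L
      rw [if_pos hPL]
    · have hLeqR : L = R := by
        by_contra hne
        exact hPL (hLright (by omega))
      have hfind : (PySem.List.pyRange 1 (R + 1) 1).find? p = none := by
        apply find?_pyRange_none p R.toNat 1 (R + 1) (by omega)
        intro k hk1 hk2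
        simp only [hpdef, decide_eq_false_iff_not]
        by_cases hkL : k < L
        · exact hLbelow k hk1 hkL
        · have : k = L := by omega
          subst this; exact hPL
      rw [hfind]
      simp only [Option.getD_none]
      show (if combZ n L > t then L else -1) = -1
      rw [if_neg hPL]
  · -- R = 0 (n ∈ {0,1}): loop does not run, both programs just test comb(n,1)
    have hReq : R = 0 := by omega
    rw [hReq]
    have hmax : max (0 : Int) 1 + 1 = 2 := by norm_num
    rw [hmax]
    have hA : aLoop n t 1 0 = 1 := by rw [aLoop]; norm_num
    show (if combZ n (aLoop n t 1 0) > t then aLoop n t 1 0 else -1)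
        = ((PySem.List.pyRange 1 2 1).find? p).getD (-1)
    rw [hA, PySem.List.pyRange_one_cons (by omega), PySem.List.pyRange_one_eq_nil (by omega)]
    by_cases h1 : combZ n 1 > t
    · simp [List.find?, hpdef, h1]
    · simp [List.find?, hpdef, h1]
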